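-- pv_equiv track=rewrite | github.com/berkeley-stat159-f17/project-3-p2-mo-ma-ne | modules.py | _delete_stems
-- ===== SOURCE A (Python) =====
-- def _delete_stems(institution):
--     '''Delete some common superfluous words in institution names.'''
--     del_stems = ['univ','school','law','business']
--     del_word_inds = []
--     for word_i in range(len(institution)):
--         for del_stem in del_stems:
--             if institution[word_i][:len(del_stem)] == del_stem:
--                 del_word_inds.append(word_i)
--     for word_i in del_word_inds[::-1]:
--         del(institution[word_i])
--     return institution
-- ===== SOURCE B (Python) =====
-- def _delete_stems(institution):
--     '''Delete some common superfluous words in institution names.'''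
--     institution[:] = [w for w in institution
--                       if all(w[:len(s)] != s for s in ('univ', 'school', 'law', 'business'))]
--     return institution
-- ===== Notes on version B (the rewrite author's own statement) =====
-- stated objective: simpler
-- what changed: Replaces the two-phase strategy (collect matching indices, then delete them one by one in reverse) with a single filtering comprehension assigned back in place via slice assignment.
import Mathlib
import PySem

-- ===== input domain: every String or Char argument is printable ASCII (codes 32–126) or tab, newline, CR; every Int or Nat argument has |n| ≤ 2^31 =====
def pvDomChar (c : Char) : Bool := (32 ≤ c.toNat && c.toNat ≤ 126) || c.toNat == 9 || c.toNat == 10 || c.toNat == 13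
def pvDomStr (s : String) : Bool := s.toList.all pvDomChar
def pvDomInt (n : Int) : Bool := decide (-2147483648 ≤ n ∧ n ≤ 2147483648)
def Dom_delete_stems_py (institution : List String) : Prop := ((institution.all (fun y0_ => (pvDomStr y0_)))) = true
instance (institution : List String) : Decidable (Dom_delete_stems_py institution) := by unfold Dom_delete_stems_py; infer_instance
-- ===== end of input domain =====

-- B replaces A's two-phase index-collect-then-reverse-delete with one in-place filtering rebuild
-- (simpler decomposition). Both Pythons mutate `institution` in place to the same final contents;
-- the theorems here are about the returned value (which equals the final list contents in both).

-- ===== PORT A =====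
-- literal transliteration of A: collect matching indices, then delete them in reverse
def delete_stems_py (institution : List String) : List String :=
  let del_stems : List String := ["univ", "school", "law", "business"]
  let del_word_inds : List Nat :=
    (List.range institution.length).foldl
      (fun acc word_i =>
        del_stems.foldl
          (fun acc2 del_stem =>
            if (institution.getD word_i "").toList.take del_stem.toList.length
                 = del_stem.toList
            then acc2 ++ [word_i] else acc2)
          acc)
      []
  del_word_inds.reverse.foldl (fun cur word_i => cur.eraseIdx word_i) institution

-- ===== PORT B =====
-- literal transliteration of B: one filtering pass keeping words matching no stem
def delete_stems_py_alt (institution : List String) : List String :=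
  institution.filter (fun w =>
    (["univ", "school", "law", "business"] : List String).all
      (fun s => w.toList.take s.toList.length ≠ s.toList))

-- ===== PRECONDITION & SPEC =====
def Spec_delete_stems_py (institution : List String) (out : List String) : Prop := out = delete_stems_py_alt institution
instance (institution : List String) (out : List String) : Decidable (Spec_delete_stems_py institution out) := by unfold Spec_delete_stems_py; infer_instance

-- ===== CLAIM (what is proved, stated in full; the proofs are below) =====
def Claim_equal_delete_stems_py : Prop := ∀ (institution : List String), Dom_delete_stems_py institution → Spec_delete_stems_py institution (delete_stems_py institution)

-- ===== LEMMAS AND PROOFS =====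

-- a word is "bad" iff some stem is a prefix of it (by A's slice test)
def pvBad (w : String) : Bool :=
  (w.toList.take 4 == "univ".toList) || (w.toList.take 6 == "school".toList) ||
  (w.toList.take 3 == "law".toList) || (w.toList.take 8 == "business".toList)

-- the indices A collects, defined structurally
def pvBadIdx : List String → List Nat
  | [] => []
  | w :: ws => (if pvBad w then [0] else []) ++ (pvBadIdx ws).map (· + 1)

-- the four stems begin with distinct characters, so at most one matches: the inner
-- stem loop appends the index at most once
theorem pvStemFold (acc : List Nat) (i : Nat) (w : String) :
    (["univ", "school", "law", "business"] : List String).foldl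
      (fun acc2 del_stem =>
        if w.toList.take del_stem.toList.length = del_stem.toList
        then acc2 ++ [i] else acc2) acc
    = acc ++ (if pvBad w then [i] else []) := by
  cases h : w.toList with
  | nil => simp [List.foldl, pvBad, h]
  | cons c rest =>
    simp only [List.foldl, pvBad, h]
    split_ifs <;> simp_all
    tauto

theorem pvIdxEq (institution : List String) :
    (List.range institution.length).foldl
      (fun acc word_i =>
        (["univ", "school", "law", "business"] : List String).foldl
          (fun acc2 del_stem =>
            if (institution.getD word_i "").toList.take del_stem.toList.length
                 = del_stem.toList
            then acc2 ++ [word_i] else acc2)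
          acc)
      []
    = pvBadIdx institution := by
  have hstep : ∀ (l : List String),
      (List.range l.length).foldl
        (fun acc word_i =>
          (["univ", "school", "law", "business"] : List String).foldl
            (fun acc2 del_stem =>
              if (l.getD word_i "").toList.take del_stem.toList.length
                   = del_stem.toList
              then acc2 ++ [word_i] else acc2)
            acc)
        []
      = (List.range l.length).flatMap (fun i => if pvBad (l.getD i "") then [i] else []) := by
    intro l
    have := PySem.List.foldl_append_eq_flatMap
      (l := List.range l.length)
      (g := fun i => if pvBad (l.getD i "") then [i] else []) (acc := [])
    simp only [List.nil_append] at this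
    rw [← this]
    congr 1
    funext acc i
    exact pvStemFold acc i (l.getD i "")
  rw [hstep]
  induction institution with
  | nil => simp [pvBadIdx]
  | cons w ws ih =>
    simp only [List.length_cons, List.range_succ_eq_map, List.flatMap_cons, pvBadIdx]
    simp only [List.flatMap_map]
    have : (List.range ws.length).flatMap
        (fun i => if pvBad ((w :: ws).getD (i + 1) "") then [i + 1] else [])
        = ((List.range ws.length).flatMap (fun i => if pvBad (ws.getD i "") then [i] else [])).map (· + 1) := by
      rw [List.map_flatMap]
      apply List.flatMap_congr
      intro i _
      simp only [List.getD_cons_succ]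
      split <;> simp
    simp only [List.getD_cons_zero] at *
    rw [this, ih]

-- deleting the increasing bad-index list in reverse = filtering out the bad words
theorem pvEraseShift (r : List Nat) (w : String) (ws : List String) :
    (r.map (· + 1)).foldl (fun cur i => cur.eraseIdx i) (w :: ws)
      = w :: r.foldl (fun cur i => cur.eraseIdx i) ws := by
  induction r generalizing ws with
  | nil => rfl
  | cons a r ih => simp only [List.map_cons, List.foldl_cons, List.eraseIdx_cons_succ, ih]

theorem pvDelEq : ∀ (l : List String),
    (pvBadIdx l).reverse.foldl (fun cur i => cur.eraseIdx i) l
      = l.filter (fun w => !pvBad w) := by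
  intro l
  induction l with
  | nil => rfl
  | cons w ws ih =>
    simp only [pvBadIdx, List.reverse_append, List.foldl_append, List.filter_cons]
    rw [← List.map_reverse, pvEraseShift, ih]
    by_cases h : pvBad w <;> simp [h]

theorem pvAltFilter (institution : List String) :
    delete_stems_py_alt institution = institution.filter (fun w => !pvBad w) := by
  unfold delete_stems_py_alt
  apply List.filter_congr
  intro w _
  simp only [List.all_cons, List.all_nil, Bool.and_true, pvBad, Bool.not_or, decide_not,
    show ("univ" : String).toList.length = 4 from rfl,
    show ("school" : String).toList.length = 6 from rfl,
    show ("law" : String).toList.length = 3 from rfl,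
    show ("business" : String).toList.length = 8 from rfl,
    beq_eq_decide, Bool.and_assoc]

-- ===== VERDICT (by name: the statement is the Claim_ definition above) =====
theorem delete_stems_py_spec : Claim_equal_delete_stems_py := by
  intro institution _
  unfold Spec_delete_stems_py delete_stems_py
  rw [pvAltFilter]
  simp only [pvIdxEq]
  exact pvDelEq institution
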